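-- pv_equiv track=rewrite | github.com/ezaayt07-prog/pertemuan-1 | pertemuan.4/pertemuan.4.py | parse_nim
-- ===== SOURCE A (Python) =====
-- def parse_nim(nim_str):
-- 	"""Mengambil stamina (3 digit terakhir), tinggi menara (2 digit terakhir),
-- 	dan jumlah koridor (digit kedua dari belakang) dari string NIM.
--
-- 	Asumsi: NIM mengandung minimal 3 digit angka di akhir.
-- 	"""
-- 	# ambil hanya digit dari input
-- 	digits = ''.join(ch for ch in nim_str if ch.isdigit())
-- 	if len(digits) < 3:
-- 		raise ValueError('NIM harus memiliki minimal 3 digit angka.')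
-- 	stamina = int(digits[-3:])
-- 	tower_height = int(digits[-2:])
-- 	corridors = int(digits[-2])  # digit kedua dari belakang
-- 	return stamina, tower_height, corridors
-- ===== SOURCE B (Python) =====
-- def parse_nim(nim_str):
-- 	# Reverse scan: collect only the last three digits, stopping early.
-- 	buf = []
-- 	for ch in reversed(nim_str):
-- 		if ch.isdigit():
-- 			buf.append(ch)
-- 			if len(buf) == 3:
-- 				break
-- 	if len(buf) < 3:
-- 		raise ValueError('NIM harus memiliki minimal 3 digit angka.')
-- 	last3 = ''.join(reversed(buf))
-- 	return int(last3), int(last3[1:]), int(last3[1])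
-- ===== Notes on version B (the rewrite author's own statement) =====
-- stated objective: alternative
-- what changed: B replaces A's full filter-all-digits pass plus negative slicing by a reverse scan that collects exactly the last three digits and breaks early, then rebuilds the three-digit string once.
import Mathlib
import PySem

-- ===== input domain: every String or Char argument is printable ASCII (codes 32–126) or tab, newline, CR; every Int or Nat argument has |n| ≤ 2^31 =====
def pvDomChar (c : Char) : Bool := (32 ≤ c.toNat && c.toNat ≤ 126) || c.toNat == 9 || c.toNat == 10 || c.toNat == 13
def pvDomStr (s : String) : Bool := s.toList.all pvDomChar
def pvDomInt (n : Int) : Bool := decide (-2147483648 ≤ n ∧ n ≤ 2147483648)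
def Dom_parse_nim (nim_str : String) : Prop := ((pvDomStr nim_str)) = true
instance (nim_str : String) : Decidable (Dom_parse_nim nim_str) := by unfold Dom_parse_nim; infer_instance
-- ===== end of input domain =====

-- B replaces A's filter-all-digits-then-slice pass by a reverse scan that collects just the last three digits and stops early (objective: alternative decomposition; speed not measured).


-- ===== PORT A =====
-- Port of A: filter every digit of the string, then slice the tail.
def parse_nim (nim_str : String) : Int × Int × Int :=
  let digits := nim_str.toList.filter (fun ch => PySem.Chars.isdigit ch)
  if digits.length < 3 then (0, 0, 0)  -- Python raises ValueError here; excluded by Pre_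
  else
    let stamina := (PySem.Int.ofChars? (PySem.List.slice digits (some (-3)) none)).getD 0
    let tower_height := (PySem.Int.ofChars? (PySem.List.slice digits (some (-2)) none)).getD 0
    let corridors := ((PySem.List.pyGet? digits (-2)).bind (fun c => PySem.Int.ofChars? [c])).getD 0
    (stamina, tower_height, corridors)

-- ===== PORT B =====
-- B's loop: scan the reversed string, append digits to buf, break once three are collected.
def pvAltLoop (l : List Char) (buf : List Char) : List Char :=
  match l with
  | [] => buf
  | c :: rest =>
    if PySem.Chars.isdigit c then
      let buf' := buf ++ [c]
      if buf'.length = 3 then buf' else pvAltLoop rest buf'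
    else pvAltLoop rest buf

def parse_nim_alt (nim_str : String) : Int × Int × Int :=
  let buf := pvAltLoop nim_str.toList.reverse []
  if buf.length < 3 then (0, 0, 0)  -- Python raises ValueError here; excluded by Pre_
  else
    let last3 := buf.reverse
    let stamina := (PySem.Int.ofChars? last3).getD 0
    let tower_height := (PySem.Int.ofChars? (PySem.List.slice last3 (some 1) none)).getD 0
    let corridors := ((PySem.List.pyGet? last3 1).bind (fun c => PySem.Int.ofChars? [c])).getD 0
    (stamina, tower_height, corridors)

-- ===== PRECONDITION & SPEC =====
-- Pre_: the string contains at least three digit characters; otherwise A (and B) raise ValueError.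
def Pre_parse_nim (nim_str : String) : Prop :=
  3 ≤ (nim_str.toList.countP (fun ch => PySem.Chars.isdigit ch))
instance (nim_str : String) : Decidable (Pre_parse_nim nim_str) := by unfold Pre_parse_nim; infer_instance
def pvWitness_parse_nim : String := "NIM-230123"
def Spec_parse_nim (nim_str : String) (out : Int × Int × Int) : Prop := out = parse_nim_alt nim_str
instance (nim_str : String) (out : Int × Int × Int) : Decidable (Spec_parse_nim nim_str out) := by unfold Spec_parse_nim; infer_instance

-- ===== CLAIM (what is proved, stated in full; the proofs are below) =====
def Claim_equal_parse_nim : Prop := ∀ (nim_str : String), Dom_parse_nim nim_str → Pre_parse_nim nim_str → Spec_parse_nim nim_str (parse_nim nim_str)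

-- ===== LEMMAS AND PROOFS =====

-- B's loop collects the first three digits of its input (all of them if fewer than three).
theorem pvAltLoop_eq (l : List Char) (buf : List Char) (h : buf.length < 3) :
    pvAltLoop l buf = (buf ++ l.filter (fun ch => PySem.Chars.isdigit ch)).take 3 := by
  induction l generalizing buf with
  | nil => simp [pvAltLoop, List.take_of_length_le (Nat.le_of_lt h)]
  | cons c rest ih =>
    simp only [pvAltLoop, List.filter_cons]
    by_cases hc : PySem.Chars.isdigit c
    · simp only [hc, if_true]
      by_cases h3 : (buf ++ [c]).length = 3
      · simp only [h3, if_true]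
        rw [show buf ++ c :: List.filter (fun ch => PySem.Chars.isdigit ch) rest
              = (buf ++ [c]) ++ List.filter (fun ch => PySem.Chars.isdigit ch) rest by simp]
        rw [List.take_append_of_le_length (by omega), List.take_of_length_le (by omega)]
      · simp only [h3, if_false]
        rw [ih (buf ++ [c]) (by simp at h3 ⊢; omega)]
        simp
    · simp [hc, ih buf h]

-- ===== VERDICT (by name: the statement is the Claim_ definition above) =====
theorem parse_nim_spec : Claim_equal_parse_nim := by
  intro nim_str _ hpre
  unfold Spec_parse_nim parse_nim parse_nim_alt
  set ds := nim_str.toList.filter (fun ch => PySem.Chars.isdigit ch) with hds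
  have hlen : 3 ≤ ds.length := by
    simpa [Pre_parse_nim, hds, List.countP_eq_length_filter] using hpre
  have hbuf : pvAltLoop nim_str.toList.reverse [] = (ds.reverse).take 3 := by
    rw [pvAltLoop_eq _ _ (by simp), List.filter_reverse]
    simp [hds]
  rw [hbuf]
  have hlast3 : ((ds.reverse).take 3).reverse = ds.drop (ds.length - 3) := by
    rw [List.take_reverse, List.reverse_reverse]
  have hlen3 : ((ds.reverse).take 3).length = 3 := by
    simp; omega
  rw [if_neg (by omega), if_neg (by omega), hlast3]
  have h2 : PySem.List.slice ds (some (-2)) none = (ds.drop (ds.length - 3)).tail := by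
    rw [PySem.List.slice_from_neg_ofNat ds 2 (by omega), List.tail_drop]
    congr 1; omega
  have h3 : PySem.List.slice ds (some (-3)) none = ds.drop (ds.length - 3) :=
    PySem.List.slice_from_neg_ofNat ds 3 (by omega)
  have hget : PySem.List.pyGet? ds (-2) = PySem.List.pyGet? (ds.drop (ds.length - 3)) 1 := by
    have hL : (List.drop (ds.length - 3) ds).length = 3 := by simp; omega
    simp only [PySem.List.pyGet?, PySem.List.pyIdx?, hL]
    norm_num
    rw [if_pos (by omega : 2 ≤ ds.length)]
    simp only [Option.bind_some]
    congr 1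
    omega
  rw [h2, h3, hget]
  simp only [PySem.List.slice_from_one]
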